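-- pv_equiv track=rewrite | github.com/ArkhipovNikita/algorithms | stepik/dynamic/partial_sums.py | solve
-- ===== SOURCE A (Python) =====
-- from typing import List, Tuple
--
-- def solve(n: int, m: int, arr: List[List[int]], q: List[Tuple[int, int, int, int]]) -> int:
--     s = [[0] * (m + 1) for _ in range(n + 1)]
--
--     for i in range(1, n + 1):
--         for j in range(1, m + 1):
--             s[i][j] = s[i - 1][j] + s[i][j - 1] - s[i - 1][j - 1] + arr[i - 1][j - 1]
--
--     q_sum = 0
--
--     for x1, x2, y1, y2 in q:
--         q_sum += s[x2][y2] - s[x1 - 1][y2] - s[x2][y1 - 1] + s[x1 - 1][y1 - 1]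
--
--     return q_sum
-- ===== SOURCE B (Python) =====
-- def solve(n, m, arr, q):
--     pref = []
--     for i in range(n):
--         p = [0]
--         for j in range(m):
--             p.append(p[j] + arr[i][j])
--         pref.append(p)
--     q_sum = 0
--     for x1, x2, y1, y2 in q:
--         for i in range(x1 - 1, x2):
--             q_sum += pref[i][y2] - pref[i][y1 - 1]
--     return q_sum
-- ===== Notes on version B (the rewrite author's own statement) =====
-- stated objective: alternative
-- what changed: B replaces A's 2-D inclusion-exclusion prefix table with O(1) corner lookups per query by per-row running-sum prefixes and a per-query loop over the rectangle's rows (column telescoping only).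
-- outside the precondition, e.g. on solve(1, 1, [[5]], [(0, 1, 1, 1)]): A returns 0, B returns 10; on solve(2, 1, [[1], [2]], [(3, 1, 1, 1)]): A returns -2, B returns 0
import Mathlib
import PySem

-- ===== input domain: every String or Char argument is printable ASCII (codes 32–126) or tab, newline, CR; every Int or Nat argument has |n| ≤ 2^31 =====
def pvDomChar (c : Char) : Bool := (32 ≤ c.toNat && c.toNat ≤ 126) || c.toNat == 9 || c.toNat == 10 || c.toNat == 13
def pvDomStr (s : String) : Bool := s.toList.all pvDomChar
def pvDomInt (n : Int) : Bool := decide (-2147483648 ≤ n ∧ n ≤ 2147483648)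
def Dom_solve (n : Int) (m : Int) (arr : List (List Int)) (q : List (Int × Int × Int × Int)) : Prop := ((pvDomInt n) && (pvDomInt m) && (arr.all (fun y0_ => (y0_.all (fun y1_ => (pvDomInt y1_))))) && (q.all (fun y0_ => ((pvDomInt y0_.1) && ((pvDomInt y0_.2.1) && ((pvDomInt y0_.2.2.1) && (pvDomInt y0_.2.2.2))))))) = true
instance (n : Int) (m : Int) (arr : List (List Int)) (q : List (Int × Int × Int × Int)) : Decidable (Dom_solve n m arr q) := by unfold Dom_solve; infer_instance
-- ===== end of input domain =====

-- B replaces A's 2-D inclusion-exclusion prefix table (O(1) corner lookups per query) by per-row running-sum prefixes and a per-query loop over the rectangle's rows (alternative algorithm, not faster).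

-- ===== PORT A =====
-- A builds an (n+1)×(m+1) prefix-sum table s in place, then answers each query in O(1).
-- pyGetD/pySetD are the total forms of Python's indexing/assignment; Pre_solve keeps every index in range, where they are exact.
-- the body of the inner 'for j' loop: s[i][j] = s[i-1][j] + s[i][j-1] - s[i-1][j-1] + arr[i-1][j-1]
def pvInnerStep (arr : List (List Int)) (i : Int) (s : List (List Int)) (j : Int) : List (List Int) :=
  PySem.List.pySetD s i (PySem.List.pySetD (PySem.List.pyGetD s i []) j
    (PySem.List.pyGetD (PySem.List.pyGetD s (i - 1) []) j 0
     + PySem.List.pyGetD (PySem.List.pyGetD s i []) (j - 1) 0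
     - PySem.List.pyGetD (PySem.List.pyGetD s (i - 1) []) (j - 1) 0
     + PySem.List.pyGetD (PySem.List.pyGetD arr (i - 1) []) (j - 1) 0))

-- the body of the outer 'for i' loop
def pvRowLoop (arr : List (List Int)) (m : Int) (s : List (List Int)) (i : Int) : List (List Int) :=
  (PySem.List.pyRange 1 (m + 1) 1).foldl (pvInnerStep arr i) s

-- s = [[0]*(m+1) for _ in range(n+1)] followed by the two nested for loops
def pvBuild (n : Int) (m : Int) (arr : List (List Int)) : List (List Int) :=
  (PySem.List.pyRange 1 (n + 1) 1).foldl (pvRowLoop arr m)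
    ((PySem.List.pyRange 0 (n + 1) 1).map (fun _ => PySem.List.pyRepeat [(0 : Int)] (m + 1)))

def solve (n : Int) (m : Int) (arr : List (List Int)) (q : List (Int × Int × Int × Int)) : Int :=
  let s := pvBuild n m arr
  q.foldl (fun q_sum t =>
    match t with
    | (x1, x2, y1, y2) =>
      q_sum + PySem.List.pyGetD (PySem.List.pyGetD s x2 []) y2 0
            - PySem.List.pyGetD (PySem.List.pyGetD s (x1 - 1) []) y2 0
            - PySem.List.pyGetD (PySem.List.pyGetD s x2 []) (y1 - 1) 0
            + PySem.List.pyGetD (PySem.List.pyGetD s (x1 - 1) []) (y1 - 1) 0) 0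

-- ===== PORT B =====
-- p = [0]; for j in range(m): p.append(p[j] + arr[i][j])
def pvPrefRow (m : Int) (arr : List (List Int)) (i : Int) : List Int :=
  (PySem.List.pyRange 0 m 1).foldl (fun p j =>
    p ++ [PySem.List.pyGetD p j 0 + PySem.List.pyGetD (PySem.List.pyGetD arr i []) j 0]) [0]

-- pref = []; for i in range(n): pref.append(<prefix row i>)
def pvPref (n : Int) (m : Int) (arr : List (List Int)) : List (List Int) :=
  (PySem.List.pyRange 0 n 1).foldl (fun pref i => pref ++ [pvPrefRow m arr i]) []

def solve_alt (n : Int) (m : Int) (arr : List (List Int)) (q : List (Int × Int × Int × Int)) : Int :=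
  let pref := pvPref n m arr
  q.foldl (fun q_sum t =>
    match t with
    | (x1, x2, y1, y2) =>
      (PySem.List.pyRange (x1 - 1) x2 1).foldl (fun acc i =>
        acc + (PySem.List.pyGetD (PySem.List.pyGetD pref i []) y2 0
             - PySem.List.pyGetD (PySem.List.pyGetD pref i []) (y1 - 1) 0)) q_sum) 0

-- ===== PRECONDITION & SPEC =====
-- Pre_solve: if both loops run, arr holds an n×m matrix (first n rows, first m columns), and every query has a
-- row range with 1 ≤ x1, x1-1 ≤ x2 ≤ n and column indices valid for a length-(m+1) row (negative wrap allowed,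
-- where both programs read the same cells), or is a degenerate rectangle (x2 = x1-1 or y2 = y1-1) whose lookups
-- stay in range and cancel to 0.  It excludes other queries with out-of-range or x-reversed bounds, on which
-- A's value (negative-index wraparound into the row axis of the prefix table, or a reversed row telescoping)
-- is an accident of the prefix-sum implementation rather than a rectangle sum.
def Pre_solve (n : Int) (m : Int) (arr : List (List Int)) (q : List (Int × Int × Int × Int)) : Prop :=
  (1 ≤ n ∧ 1 ≤ m → n ≤ (arr.length : Int) ∧ ∀ row ∈ arr.take n.toNat, m ≤ (row.length : Int)) ∧
  ∀ t ∈ q,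
    (1 ≤ t.1 ∧ t.1 - 1 ≤ t.2.1 ∧ t.2.1 ≤ n ∧
      -(m + 1) ≤ t.2.2.2 ∧ t.2.2.2 ≤ m ∧ -(m + 1) ≤ t.2.2.1 - 1 ∧ t.2.2.1 - 1 ≤ m) ∨
    (t.2.1 = t.1 - 1 ∧ -(n + 1) ≤ t.2.1 ∧ t.2.1 ≤ n ∧ -(m + 1) ≤ t.2.2.2 ∧ t.2.2.2 ≤ m ∧
      -(m + 1) ≤ t.2.2.1 - 1 ∧ t.2.2.1 - 1 ≤ m) ∨
    (t.2.2.2 = t.2.2.1 - 1 ∧ -(n + 1) ≤ t.2.1 ∧ t.2.1 ≤ n ∧ -(n + 1) ≤ t.1 - 1 ∧ t.1 - 1 ≤ n ∧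
      -(m + 1) ≤ t.2.2.2 ∧ t.2.2.2 ≤ m ∧ (t.1 - 1 < t.2.1 → -n ≤ t.1 - 1 ∧ t.2.1 ≤ n))
instance (n : Int) (m : Int) (arr : List (List Int)) (q : List (Int × Int × Int × Int)) : Decidable (Pre_solve n m arr q) := by unfold Pre_solve; infer_instance

def pvWitness_solve : Int × Int × List (List Int) × (List (Int × Int × Int × Int)) :=
  (2, 3, [[1, 2, 3], [4, 5, 6]], [(1, 2, 2, 3), (2, 2, 1, 1)])

def Spec_solve (n : Int) (m : Int) (arr : List (List Int)) (q : List (Int × Int × Int × Int)) (out : Int) : Prop := out = solve_alt n m arr q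
instance (n : Int) (m : Int) (arr : List (List Int)) (q : List (Int × Int × Int × Int)) (out : Int) : Decidable (Spec_solve n m arr q out) := by unfold Spec_solve; infer_instance

-- ===== CLAIM (what is proved, stated in full; the proofs are below) =====
def Claim_equal_solve : Prop := ∀ (n : Int) (m : Int) (arr : List (List Int)) (q : List (Int × Int × Int × Int)), Dom_solve n m arr q → Pre_solve n m arr q → Spec_solve n m arr q (solve n m arr q)

-- ===== LEMMAS AND PROOFS =====

-- arr[a][b] as a total function (0 outside; under Pre_solve every access is in range)
def pvVal (arr : List (List Int)) (a b : Nat) : Int := (arr.getD a []).getD b 0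

-- the mathematical 2-D prefix sum
def pvS (arr : List (List Int)) (i j : Nat) : Int :=
  ∑ a ∈ Finset.range i, ∑ b ∈ Finset.range j, pvVal arr a b

-- one row's prefix sum
def pvRow (arr : List (List Int)) (a c : Nat) : Int := ∑ b ∈ Finset.range c, pvVal arr a b

-- table entry s[i][j], total form
def pvEntry (s : List (List Int)) (i j : Int) : Int :=
  PySem.List.pyGetD (PySem.List.pyGetD s i []) j 0

def pvShape (s : List (List Int)) (N M : Nat) : Prop :=
  s.length = N + 1 ∧ ∀ r ∈ s, r.length = M + 1

lemma pvS_rec (arr : List (List Int)) (i j : Nat) :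
    pvS arr (i + 1) (j + 1)
      = pvS arr i (j + 1) + pvS arr (i + 1) j - pvS arr i j + pvVal arr i j := by
  simp [pvS, Finset.sum_range_succ]; ring

lemma pvGetD_nonneg {α : Type} (xs : List α) (i : Int) (d : α) (h : 0 ≤ i) :
    PySem.List.pyGetD xs i d = xs.getD i.toNat d := by
  have : i = ((i.toNat : Nat) : Int) := by omega
  rw [this, PySem.List.pyGetD_natCast]
  exact congrArg (fun k => xs.getD k d) (by omega)


lemma pvTele (f : Nat → Int) (a c : Nat) :
    ((List.range c).map (fun k => f (a + k))).sum
      = (∑ t ∈ Finset.range (a + c), f t) - ∑ t ∈ Finset.range a, f t := by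
  induction c with
  | zero => simp
  | succ c ih =>
      rw [List.range_succ, List.map_append, List.sum_append, ih]
      simp [← Nat.add_assoc, Finset.sum_range_succ]
      ring

lemma pvSumRange (g : Int → Int) (f : Nat → Int) (a b : Int) (h0 : 0 ≤ a) (hab : a ≤ b)
    (hgf : ∀ i : Int, a ≤ i → i < b → g i = f i.toNat) :
    ((PySem.List.pyRange a b 1).map g).sum
      = (∑ t ∈ Finset.range b.toNat, f t) - ∑ t ∈ Finset.range a.toNat, f t := by
  have h1 : (List.range (b - a).toNat).map (g ∘ fun k : Nat => a + (k : Int))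
      = (List.range (b - a).toNat).map (fun k => f (a.toNat + k)) := by
    apply List.map_congr_left
    intro k hk
    rw [List.mem_range] at hk
    show g (a + (k : Int)) = f (a.toNat + k)
    rw [hgf (a + (k : Int)) (by omega) (by omega)]
    exact congrArg f (by omega)
  rw [PySem.List.pyRange_one, List.map_map, h1, pvTele]
  have hb : a.toNat + (b - a).toNat = b.toNat := by omega
  rw [hb]

-- inner loop invariant: after columns 1..c of row i are written
lemma pvInner_partial (arr : List (List Int)) (m : Int) (hm0 : 0 ≤ m)
    (N : Nat) (i : Nat) (hi1 : 1 ≤ i) (hiN : i ≤ N) (s : List (List Int))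
    (hS : pvShape s N m.toNat)
    (hfull : ∀ i' j : Nat, i' ≤ N → j ≤ m.toNat →
      pvEntry s i' j = if i' < i then pvS arr i' j else 0)
    (c : Nat) (hc : c ≤ m.toNat) :
    pvShape ((PySem.List.pyRange 1 ((c : Int) + 1) 1).foldl (pvInnerStep arr i) s) N m.toNat ∧
    ∀ i' j : Nat, i' ≤ N → j ≤ m.toNat →
      pvEntry ((PySem.List.pyRange 1 ((c : Int) + 1) 1).foldl (pvInnerStep arr i) s) i' j
        = if i' < i then pvS arr i' j else if i' = i ∧ j ≤ c then pvS arr i j else 0 := by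
  induction c with
  | zero =>
      rw [show ((0 : Nat) : Int) + 1 = 1 by norm_num, PySem.List.pyRange_one_eq_nil (le_refl 1)]
      simp only [List.foldl_nil]
      refine ⟨hS, ?_⟩
      intro i' j h1 h2
      rw [hfull i' j h1 h2]
      by_cases hlt : i' < i
      · simp [hlt]
      · simp only [if_neg hlt]
        by_cases hmid : i' = i ∧ j ≤ 0
        · have hj0 : j = 0 := by omega
          subst hj0
          simp [hmid, pvS]
        · rw [if_neg hmid]
  | succ c ih =>
      have hc' : c ≤ m.toNat := by omega
      obtain ⟨ihS, ihE⟩ := ih hc'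
      have hcast : (((c + 1 : Nat)) : Int) + 1 = ((c : Int) + 1) + 1 := by push_cast; ring
      rw [hcast, PySem.List.pyRange_one_succ_right (by omega : (1 : Int) ≤ (c : Int) + 1),
        List.foldl_append, List.foldl_cons, List.foldl_nil]
      set s' := (PySem.List.pyRange 1 ((c : Int) + 1) 1).foldl (pvInnerStep arr ↑i) s with hs'
      obtain ⟨hlen, hrows⟩ := ihS
      have hrow_mem : PySem.List.pyGetD s' ((i : Nat) : Int) [] ∈ s' :=
        PySem.List.pyGetD_mem s' [] (by constructor <;> omega)
      have hrowlen : (PySem.List.pyGetD s' ((i : Nat) : Int) []).length = m.toNat + 1 :=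
        hrows _ hrow_mem
      have e1 : ((i : Nat) : Int) - 1 = ((i - 1 : Nat) : Int) := by omega
      have e2 : ((c : Int) + 1) = (((c + 1 : Nat)) : Int) := by push_cast; ring
      have e3 : ((c : Int) + 1) - 1 = ((c : Nat) : Int) := by omega
      have g1 : PySem.List.pyGetD (PySem.List.pyGetD s' (((i - 1 : Nat)) : Int) []) (((c + 1 : Nat)) : Int) 0
          = pvS arr (i - 1) (c + 1) := by
        have := ihE (i - 1) (c + 1) (by omega) (by omega)
        rw [pvEntry] at this
        rw [this, if_pos (by omega : i - 1 < i)]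
      have g2 : PySem.List.pyGetD (PySem.List.pyGetD s' ((i : Nat) : Int) []) ((c : Nat) : Int) 0
          = pvS arr i c := by
        have := ihE i c (by omega) (by omega)
        rw [pvEntry] at this
        rw [this, if_neg (by omega : ¬ i < i), if_pos (by omega : i = i ∧ c ≤ c)]
      have g3 : PySem.List.pyGetD (PySem.List.pyGetD s' (((i - 1 : Nat)) : Int) []) ((c : Nat) : Int) 0
          = pvS arr (i - 1) c := by
        have := ihE (i - 1) c (by omega) (by omega)
        rw [pvEntry] at this
        rw [this, if_pos (by omega : i - 1 < i)]
      have g4 : PySem.List.pyGetD (PySem.List.pyGetD arr (((i - 1 : Nat)) : Int) []) ((c : Nat) : Int) 0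
          = pvVal arr (i - 1) c := by
        rw [pvGetD_nonneg arr _ [] (by positivity), pvGetD_nonneg _ _ 0 (by positivity)]
        simp [pvVal]
      refine ⟨?_, ?_⟩
      · unfold pvInnerStep
        constructor
        · rw [PySem.List.length_pySetD]; exact hlen
        · intro r hr
          rw [PySem.List.pySetD_natCast] at hr
          rcases List.mem_or_eq_of_mem_set hr with h | h
          · exact hrows r h
          · subst h
            rw [e2, PySem.List.pySetD_natCast, List.length_set]
            exact hrowlen
      · intro i' j h1 h2
        unfold pvInnerStep pvEntry
        rw [PySem.List.pyGetD_pySetD_natCast s' i i' _ [] (by omega : i < s'.length)]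
        by_cases hii : i' = i
        · subst hii
          rw [if_pos rfl, e2]
          rw [PySem.List.pyGetD_pySetD_natCast (PySem.List.pyGetD s' ((i' : Nat) : Int) [])
            (c + 1) j _ 0 (by rw [hrowlen]; omega)]
          rw [e1, show (((c + 1 : Nat)) : Int) - 1 = ((c : Nat) : Int) by push_cast; ring]
          rw [g1, g2, g3, g4]
          have hrec := pvS_rec arr (i' - 1) c
          rw [show i' - 1 + 1 = i' from by omega] at hrec
          by_cases hjj : j = c + 1
          · rw [if_pos hjj, if_neg (by omega : ¬ i' < i'), if_pos (by omega : i' = i' ∧ j ≤ c + 1), hjj]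
            exact hrec.symm
          · rw [if_neg hjj]
            have hold := ihE i' j h1 h2
            rw [pvEntry] at hold
            rw [hold, if_neg (by omega : ¬ i' < i'), if_neg (by omega : ¬ i' < i')]
            by_cases hjc : j ≤ c
            · rw [if_pos ⟨rfl, hjc⟩, if_pos ⟨rfl, by omega⟩]
            · rw [if_neg (by omega : ¬ (i' = i' ∧ j ≤ c)), if_neg (by omega : ¬ (i' = i' ∧ j ≤ c + 1))]
        · rw [if_neg hii]
          have := ihE i' j h1 h2
          rw [pvEntry] at this
          rw [this]
          have hni : ¬ i' < i → ¬ (i' = i ∧ j ≤ c) := by omega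
          have hni' : ¬ i' < i → ¬ (i' = i ∧ j ≤ c + 1) := by omega
          by_cases hlt : i' < i
          · rw [if_pos hlt, if_pos hlt]
          · rw [if_neg hlt, if_neg hlt, if_neg (hni hlt), if_neg (hni' hlt)]

lemma pvOuter_partial (arr : List (List Int)) (n m : Int) (hn0 : 0 ≤ n) (hm0 : 0 ≤ m)
    (k : Nat) (hk : k ≤ n.toNat) :
    pvShape ((PySem.List.pyRange 1 ((k : Int) + 1) 1).foldl (pvRowLoop arr m)
        ((PySem.List.pyRange 0 (n + 1) 1).map (fun _ => PySem.List.pyRepeat [(0 : Int)] (m + 1)))) n.toNat m.toNat ∧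
    ∀ i j : Nat, i ≤ n.toNat → j ≤ m.toNat →
      pvEntry ((PySem.List.pyRange 1 ((k : Int) + 1) 1).foldl (pvRowLoop arr m)
          ((PySem.List.pyRange 0 (n + 1) 1).map (fun _ => PySem.List.pyRepeat [(0 : Int)] (m + 1)))) i j
        = if i ≤ k then pvS arr i j else 0 := by
  have hs0len : ((PySem.List.pyRange 0 (n + 1) 1).map
      (fun _ => PySem.List.pyRepeat [(0 : Int)] (m + 1))).length = n.toNat + 1 := by
    rw [List.length_map, PySem.List.length_pyRange_one]
    omega
  have hs0rows : ∀ r ∈ (PySem.List.pyRange 0 (n + 1) 1).map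
      (fun _ => PySem.List.pyRepeat [(0 : Int)] (m + 1)), r.length = m.toNat + 1 := by
    intro r hr
    rw [List.mem_map] at hr
    obtain ⟨_, _, rfl⟩ := hr
    rw [PySem.List.pyRepeat_singleton, List.length_replicate]
    omega
  have hs0ent : ∀ i j : Nat, pvEntry ((PySem.List.pyRange 0 (n + 1) 1).map
      (fun _ => PySem.List.pyRepeat [(0 : Int)] (m + 1))) i j = 0 := by
    intro i j
    rw [pvEntry, PySem.List.pyGetD_natCast, PySem.List.pyGetD_natCast]
    by_cases hi : i < ((PySem.List.pyRange 0 (n + 1) 1).map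
        (fun _ => PySem.List.pyRepeat [(0 : Int)] (m + 1))).length
    · have hmem : ((PySem.List.pyRange 0 (n + 1) 1).map
          (fun _ => PySem.List.pyRepeat [(0 : Int)] (m + 1))).getD i [] ∈
          (PySem.List.pyRange 0 (n + 1) 1).map (fun _ => PySem.List.pyRepeat [(0 : Int)] (m + 1)) := by
        rw [List.getD_eq_getElem _ _ hi]
        exact List.getElem_mem _
      rw [List.mem_map] at hmem
      obtain ⟨_, _, heq⟩ := hmem
      rw [← heq, PySem.List.pyRepeat_singleton]
      simp [List.getD, List.getElem?_replicate]
      split <;> rfl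
    · have hnil : ((PySem.List.pyRange 0 (n + 1) 1).map
          (fun _ => PySem.List.pyRepeat [(0 : Int)] (m + 1))).getD i [] = [] :=
        List.getD_eq_default _ _ (by omega)
      rw [hnil]
      simp [List.getD]
  induction k with
  | zero =>
      rw [show ((0 : Nat) : Int) + 1 = 1 by norm_num, PySem.List.pyRange_one_eq_nil (le_refl 1)]
      simp only [List.foldl_nil]
      refine ⟨⟨hs0len, hs0rows⟩, ?_⟩
      intro i j hiN hjM
      rw [hs0ent i j]
      split_ifs with h
      · have : i = 0 := by omega
        subst this
        simp [pvS]
      · rfl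
  | succ k ih =>
      obtain ⟨ihS, ihE⟩ := ih (by omega)
      have hcast : (((k + 1 : Nat)) : Int) + 1 = ((k : Int) + 1) + 1 := by push_cast; ring
      rw [hcast, PySem.List.pyRange_one_succ_right (by omega : (1 : Int) ≤ (k : Int) + 1),
        List.foldl_append, List.foldl_cons, List.foldl_nil]
      set s' := (PySem.List.pyRange 1 ((k : Int) + 1) 1).foldl (pvRowLoop arr m)
        ((PySem.List.pyRange 0 (n + 1) 1).map (fun _ => PySem.List.pyRepeat [(0 : Int)] (m + 1))) with hs'
      have hfull : ∀ i' j : Nat, i' ≤ n.toNat → j ≤ m.toNat →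
          pvEntry s' i' j = if i' < k + 1 then pvS arr i' j else 0 := by
        intro i' j h1 h2
        rw [ihE i' j h1 h2]
        by_cases h : i' ≤ k
        · rw [if_pos h, if_pos (by omega)]
        · rw [if_neg h, if_neg (by omega)]
      have hstep := pvInner_partial arr m hm0 n.toNat (k + 1) (by omega) (by omega) s' ihS hfull
        m.toNat (le_refl _)
      have hloop : pvRowLoop arr m s' ((k : Int) + 1)
          = (PySem.List.pyRange 1 ((m.toNat : Int) + 1) 1).foldl (pvInnerStep arr ((k + 1 : Nat) : Int)) s' := by
        rw [pvRowLoop, show ((k : Int) + 1) = (((k + 1 : Nat)) : Int) by push_cast; ring,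
          show (m + 1 : Int) = ((m.toNat : Int) + 1) by omega]
      rw [hloop]
      obtain ⟨hS2, hE2⟩ := hstep
      refine ⟨hS2, ?_⟩
      intro i j h1 h2
      rw [hE2 i j h1 h2]
      by_cases hlt : i < k + 1
      · rw [if_pos hlt, if_pos (by omega)]
      · rw [if_neg hlt]
        by_cases heq : i = k + 1
        · rw [if_pos ⟨heq, h2⟩, if_pos (by omega), heq]
        · rw [if_neg (by omega : ¬ (i = k + 1 ∧ j ≤ m.toNat)), if_neg (by omega)]

lemma pvBuild_entry (arr : List (List Int)) (n m : Int) (hn0 : 0 ≤ n) (hm0 : 0 ≤ m)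
    (i j : Int) (h0i : 0 ≤ i) (hin : i ≤ n) (h0j : 0 ≤ j) (hjm : j ≤ m) :
    PySem.List.pyGetD (PySem.List.pyGetD (pvBuild n m arr) i []) j 0 = pvS arr i.toNat j.toNat := by
  have h := (pvOuter_partial arr n m hn0 hm0 n.toNat (le_refl _)).2 i.toNat j.toNat (by omega) (by omega)
  rw [if_pos (by omega : i.toNat ≤ n.toNat)] at h
  rw [pvEntry] at h
  rw [show ((n.toNat : Nat) : Int) = n by omega, show ((i.toNat : Nat) : Int) = i by omega,
    show ((j.toNat : Nat) : Int) = j by omega] at h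
  rw [pvBuild]
  exact h

-- wrapped column index: Python's xs[y] on a length-(m+1) row with -(m+1) ≤ y ≤ m
def pvYIdx (m y : Int) : Nat := (if y < 0 then y + m + 1 else y).toNat

lemma pvGetD_wrapNeg {α : Type} (xs : List α) (y : Int) (d : α)
    (h1 : -(xs.length : Int) ≤ y) (h2 : y < 0) :
    PySem.List.pyGetD xs y d = PySem.List.pyGetD xs (y + xs.length) d := by
  have hk1 : 0 < (-y).toNat := by omega
  have hk2 : (-y).toNat ≤ xs.length := by omega
  rw [show y = -(((-y).toNat : Nat) : Int) by omega,
    PySem.List.pyGetD_neg_natCast xs ((-y).toNat) d hk1 hk2,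
    show (-(((-y).toNat : Nat) : Int) + (xs.length : Int))
      = ((xs.length - (-y).toNat : Nat) : Int) by omega,
    PySem.List.pyGetD_natCast, List.getD_eq_getElem _ _ (by omega)]

-- shape of A's table, as pvBuild
lemma pvBuild_shape (arr : List (List Int)) (n m : Int) (hn0 : 0 ≤ n) (hm0 : 0 ≤ m) :
    pvShape (pvBuild n m arr) n.toNat m.toNat := by
  have h := (pvOuter_partial arr n m hn0 hm0 n.toNat (le_refl _)).1
  rw [show ((n.toNat : Nat) : Int) = n by omega] at h
  rw [pvBuild]
  exact h

-- A's table lookup with a possibly negative (wrapping) column index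
lemma pvBuild_lookupW (arr : List (List Int)) (n m : Int) (hn0 : 0 ≤ n) (hm0 : 0 ≤ m)
    (i y : Int) (h0i : 0 ≤ i) (hin : i ≤ n) (hy1 : -(m + 1) ≤ y) (hy2 : y ≤ m) :
    PySem.List.pyGetD (PySem.List.pyGetD (pvBuild n m arr) i []) y 0
      = pvS arr i.toNat (pvYIdx m y) := by
  by_cases hy : 0 ≤ y
  · rw [pvBuild_entry arr n m hn0 hm0 i y h0i hin hy hy2,
      show pvYIdx m y = y.toNat from by unfold pvYIdx; rw [if_neg (by omega)]]
  · obtain ⟨hlen, hrows⟩ := pvBuild_shape arr n m hn0 hm0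
    have hmem : PySem.List.pyGetD (pvBuild n m arr) i [] ∈ pvBuild n m arr :=
      PySem.List.pyGetD_mem _ [] (by constructor <;> omega)
    have hrl : (PySem.List.pyGetD (pvBuild n m arr) i []).length = m.toNat + 1 :=
      hrows _ hmem
    rw [pvGetD_wrapNeg _ y 0 (by omega) (by omega), hrl,
      show (y + ((m.toNat + 1 : Nat) : Int)) = y + m + 1 by omega,
      pvBuild_entry arr n m hn0 hm0 i (y + m + 1) h0i hin (by omega) (by omega),
      show pvYIdx m y = (y + m + 1).toNat from by unfold pvYIdx; rw [if_pos (by omega)]]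

-- B's prefix row i is [pvRow arr i 0, …, pvRow arr i m]
lemma pvPrefRow_partial (arr : List (List Int)) (i : Nat) (c : Nat) :
    (PySem.List.pyRange 0 ((c : Nat) : Int) 1).foldl (fun p j =>
        p ++ [PySem.List.pyGetD p j 0
              + PySem.List.pyGetD (PySem.List.pyGetD arr ((i : Nat) : Int) []) j 0]) [0]
      = (List.range (c + 1)).map (pvRow arr i) := by
  induction c with
  | zero =>
      rw [show ((0 : Nat) : Int) = 0 from rfl, PySem.List.pyRange_one_eq_nil (le_refl 0)]
      simp [pvRow]
  | succ c ih =>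
      rw [show (((c + 1 : Nat)) : Int) = ((c : Int) + 1) by push_cast; ring,
        PySem.List.pyRange_one_succ_right (by omega : (0 : Int) ≤ (c : Int)),
        List.foldl_append, List.foldl_cons, List.foldl_nil, ih]
      have hp : PySem.List.pyGetD ((List.range (c + 1)).map (pvRow arr i)) ((c : Nat) : Int) 0
          = pvRow arr i c := by
        rw [PySem.List.pyGetD_natCast, List.getD_eq_getElem _ _ (by simp)]
        simp
      have ha : PySem.List.pyGetD (PySem.List.pyGetD arr ((i : Nat) : Int) []) ((c : Nat) : Int) 0
          = pvVal arr i c := by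
        rw [pvGetD_nonneg arr _ [] (by positivity), pvGetD_nonneg _ _ 0 (by positivity)]
        simp [pvVal]
      rw [hp, ha]
      have : pvRow arr i c + pvVal arr i c = pvRow arr i (c + 1) := by
        simp [pvRow, Finset.sum_range_succ]
      rw [this]
      simp [List.range_succ]

lemma pvPref_partial (arr : List (List Int)) (m : Int) (hm0 : 0 ≤ m) (k : Nat) :
    (PySem.List.pyRange 0 ((k : Nat) : Int) 1).foldl (fun pref i => pref ++ [pvPrefRow m arr i]) []
      = (List.range k).map (fun i => (List.range (m.toNat + 1)).map (pvRow arr i)) := by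
  induction k with
  | zero =>
      rw [show ((0 : Nat) : Int) = 0 from rfl, PySem.List.pyRange_one_eq_nil (le_refl 0)]
      simp
  | succ k ih =>
      rw [show (((k + 1 : Nat)) : Int) = ((k : Int) + 1) by push_cast; ring,
        PySem.List.pyRange_one_succ_right (by omega : (0 : Int) ≤ (k : Int)),
        List.foldl_append, List.foldl_cons, List.foldl_nil, ih]
      have : pvPrefRow m arr ((k : Nat) : Int)
          = (List.range (m.toNat + 1)).map (pvRow arr k) := by
        rw [pvPrefRow, show (m : Int) = ((m.toNat : Nat) : Int) by omega]
        exact pvPrefRow_partial arr k m.toNat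
      rw [this]
      simp [List.range_succ]

lemma pvPref_eq (arr : List (List Int)) (n m : Int) (hn0 : 0 ≤ n) (hm0 : 0 ≤ m) :
    pvPref n m arr
      = (List.range n.toNat).map (fun i => (List.range (m.toNat + 1)).map (pvRow arr i)) := by
  rw [pvPref, show (n : Int) = ((n.toNat : Nat) : Int) by omega]
  exact pvPref_partial arr m hm0 n.toNat

-- B's table lookup with a possibly negative (wrapping) column index
lemma pvPref_lookupW (arr : List (List Int)) (n m : Int) (hn0 : 0 ≤ n) (hm0 : 0 ≤ m)
    (i y : Int) (h0i : 0 ≤ i) (hin : i < n) (hy1 : -(m + 1) ≤ y) (hy2 : y ≤ m) :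
    PySem.List.pyGetD (PySem.List.pyGetD (pvPref n m arr) i []) y 0
      = pvRow arr i.toNat (pvYIdx m y) := by
  rw [pvPref_eq arr n m hn0 hm0]
  have hrow : PySem.List.pyGetD ((List.range n.toNat).map
        (fun i => (List.range (m.toNat + 1)).map (pvRow arr i))) i []
      = (List.range (m.toNat + 1)).map (pvRow arr i.toNat) := by
    rw [pvGetD_nonneg _ i [] h0i, List.getD_eq_getElem _ _ (by simp; omega)]
    simp
  rw [hrow]
  by_cases hy : 0 ≤ y
  · rw [pvGetD_nonneg _ y 0 hy, List.getD_eq_getElem _ _ (by simp; omega),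
      show pvYIdx m y = y.toNat from by unfold pvYIdx; rw [if_neg (by omega)]]
    simp
  · rw [pvGetD_wrapNeg _ y 0 (by simp; omega) (by omega)]
    have hlen : (((List.range (m.toNat + 1)).map (pvRow arr i.toNat)).length : Int)
        = ((m.toNat + 1 : Nat) : Int) := by simp
    rw [hlen, pvGetD_nonneg _ _ 0 (by omega), List.getD_eq_getElem _ _ (by simp; omega),
      show pvYIdx m y = (y + ((m.toNat + 1 : Nat) : Int)).toNat from by
        unfold pvYIdx; rw [if_pos (by omega)]; omega]
    simp

-- B's per-query row loop, reduced to prefix-sum differences (general case G)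
lemma pvQueryG (arr : List (List Int)) (n m : Int) (hn0 : 0 ≤ n) (hm0 : 0 ≤ m)
    (x1 x2 y1 y2 acc : Int) (hx1 : 1 ≤ x1) (hx12 : x1 - 1 ≤ x2) (hx2n : x2 ≤ n)
    (hy2a : -(m + 1) ≤ y2) (hy2b : y2 ≤ m) (hy1a : -(m + 1) ≤ y1 - 1) (hy1b : y1 - 1 ≤ m) :
    (PySem.List.pyRange (x1 - 1) x2 1).foldl (fun acc i =>
        acc + (PySem.List.pyGetD (PySem.List.pyGetD (pvPref n m arr) i []) y2 0
             - PySem.List.pyGetD (PySem.List.pyGetD (pvPref n m arr) i []) (y1 - 1) 0)) acc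
      = acc + pvS arr x2.toNat (pvYIdx m y2) - pvS arr (x1 - 1).toNat (pvYIdx m y2)
            - pvS arr x2.toNat (pvYIdx m (y1 - 1)) + pvS arr (x1 - 1).toNat (pvYIdx m (y1 - 1)) := by
  have hstep : ∀ (acc2 : Int), ∀ i ∈ PySem.List.pyRange (x1 - 1) x2 1,
      acc2 + (PySem.List.pyGetD (PySem.List.pyGetD (pvPref n m arr) i []) y2 0
            - PySem.List.pyGetD (PySem.List.pyGetD (pvPref n m arr) i []) (y1 - 1) 0)
        = acc2 + (pvRow arr i.toNat (pvYIdx m y2) - pvRow arr i.toNat (pvYIdx m (y1 - 1))) := by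
    intro acc2 i hi
    rw [PySem.List.mem_pyRange_one] at hi
    rw [pvPref_lookupW arr n m hn0 hm0 i y2 (by omega) (by omega) hy2a hy2b,
      pvPref_lookupW arr n m hn0 hm0 i (y1 - 1) (by omega) (by omega) hy1a hy1b]
  rw [PySem.List.foldl_congr_mem (PySem.List.pyRange (x1 - 1) x2 1) _
        (fun acc2 i => acc2 + (pvRow arr i.toNat (pvYIdx m y2) - pvRow arr i.toNat (pvYIdx m (y1 - 1))))
        acc hstep]
  rw [PySem.List.foldl_add]
  rw [pvSumRange _ (fun a => pvRow arr a (pvYIdx m y2) - pvRow arr a (pvYIdx m (y1 - 1)))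
        (x1 - 1) x2 (by omega) (by omega) (fun i _ _ => rfl)]
  rw [Finset.sum_sub_distrib, Finset.sum_sub_distrib]
  have h2 : ∀ (u v : Nat), (∑ a ∈ Finset.range u, pvRow arr a v) = pvS arr u v := by
    intro u v; rfl
  rw [h2, h2, h2, h2]
  ring

lemma pvFoldlConst {α : Type} (l : List α) (a : Int) : l.foldl (fun acc _ => acc) a = a := by
  induction l generalizing a with
  | nil => rfl
  | cons x xs ih => exact ih a

-- ===== VERDICT (by name: the statement is the Claim_ definition above) =====
theorem solve_spec : Claim_equal_solve := by
  intro n m arr q hdom hpre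
  obtain ⟨hsafe, hq⟩ := hpre
  show solve n m arr q = solve_alt n m arr q
  simp only [solve, solve_alt]
  apply PySem.List.foldl_congr_mem
  intro acc t ht
  obtain ⟨x1, x2, y1, y2⟩ := t
  rcases hq _ ht with hp | hx | hy
  case inr.inl =>
    obtain ⟨hxe, _⟩ := hx
    simp only at hxe
    simp only [hxe, PySem.List.pyRange_one_eq_nil (le_refl (x1 - 1)), List.foldl_nil]
    ring
  case inr.inr =>
    obtain ⟨hye, _⟩ := hy
    simp only at hye
    simp only [hye]
    rw [PySem.List.foldl_congr_mem (PySem.List.pyRange (x1 - 1) x2 1) _ (fun acc2 _ => acc2)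
          acc (fun a i _ => by ring),
      pvFoldlConst]
    ring
  obtain ⟨hx1, hx12, hx2n, hy2a, hy2b, hy1a, hy1b⟩ := hp
  simp only at hx1 hx12 hx2n hy2a hy2b hy1a hy1b
  have hn0 : 0 ≤ n := by omega
  have hm0 : 0 ≤ m := by omega
  show acc + PySem.List.pyGetD (PySem.List.pyGetD (pvBuild n m arr) x2 []) y2 0
      - PySem.List.pyGetD (PySem.List.pyGetD (pvBuild n m arr) (x1 - 1) []) y2 0
      - PySem.List.pyGetD (PySem.List.pyGetD (pvBuild n m arr) x2 []) (y1 - 1) 0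
      + PySem.List.pyGetD (PySem.List.pyGetD (pvBuild n m arr) (x1 - 1) []) (y1 - 1) 0 = _
  rw [pvBuild_lookupW arr n m hn0 hm0 x2 y2 (by omega) (by omega) (by omega) (by omega),
    pvBuild_lookupW arr n m hn0 hm0 (x1 - 1) y2 (by omega) (by omega) (by omega) (by omega),
    pvBuild_lookupW arr n m hn0 hm0 x2 (y1 - 1) (by omega) (by omega) (by omega) (by omega),
    pvBuild_lookupW arr n m hn0 hm0 (x1 - 1) (y1 - 1) (by omega) (by omega) (by omega) (by omega),
    pvQueryG arr n m hn0 hm0 x1 x2 y1 y2 acc hx1 hx12 hx2n hy2a hy2b hy1a hy1b]
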